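-- pv_equiv track=rewrite | github.com/damani42/import-hacking-fixer | import_hacking_fixer.py | find_import_block
-- ===== SOURCE A (Python) =====
-- from typing import Dict, Iterable, List, Set, Tuple
--
-- def find_import_block(lines: List[str]) -> Tuple[int, int]:
--     """Find the start and end line indices (inclusive) of the import block."""
--     start = None
--     end = None
--     for idx, line in enumerate(lines):
--         stripped = line.strip()
--         if stripped.startswith('import ') or stripped.startswith('from '):
--             if start is None:
--                 start = idx
--             end = idx
--         elif start is not None and stripped == '':
--             end = idx
--         elif start is not None:
--             break
--     if start is None:
--         return (-1, -1)
--     return (start, end)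
-- ===== SOURCE B (Python) =====
-- def find_import_block(lines):
--     # Tag every line with a class character, then the block is pure string
--     # searching: first 'i' (import) and the first 'o' (other) after it.
--     tags = ''.join(
--         'i' if (s := line.strip()).startswith(('import ', 'from ')) else
--         'b' if s == '' else 'o'
--         for line in lines)
--     start = tags.find('i')
--     if start == -1:
--         return (-1, -1)
--     stop = tags.find('o', start)
--     end = stop - 1 if stop != -1 else len(lines) - 1
--     return (start, end)
-- ===== Notes on version B (the rewrite author's own statement) =====
-- stated objective: alternative
-- what changed: Replaces A's stateful index scan (start/end accumulators plus break) by a derived data structure: each line is classified into a one-character tag ('i'/'b'/'o'), the tags are joined into a string, and the answer is read off with two str.find substring searches (first 'i', first 'o' after it).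
import Mathlib
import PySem

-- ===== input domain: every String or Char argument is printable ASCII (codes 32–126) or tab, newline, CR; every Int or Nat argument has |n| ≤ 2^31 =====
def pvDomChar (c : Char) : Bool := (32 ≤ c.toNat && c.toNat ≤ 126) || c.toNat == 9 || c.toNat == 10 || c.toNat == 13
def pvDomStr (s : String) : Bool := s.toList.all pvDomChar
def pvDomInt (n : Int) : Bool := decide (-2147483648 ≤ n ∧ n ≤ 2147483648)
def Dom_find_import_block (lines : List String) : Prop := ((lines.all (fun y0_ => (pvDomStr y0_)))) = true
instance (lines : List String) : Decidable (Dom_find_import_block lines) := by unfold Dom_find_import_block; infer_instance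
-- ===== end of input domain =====

-- B replaces A's stateful index scan by a derived tag string ('i'/'b'/'o' per line) queried with
-- two str.find substring searches; objective: alternative.

-- ===== PORT A =====
-- literal transliteration of A's enumerate loop as structural recursion over the same state
def goA : List String → Nat → Option Nat → Option Nat → Option Nat × Option Nat
  | [], _, start, e => (start, e)
  | line :: rest, idx, start, e =>
    let stripped := PySem.Str.strip line
    if PySem.Str.startswith stripped "import " || PySem.Str.startswith stripped "from " then
      goA rest (idx + 1) (some (start.getD idx)) (some idx)
    else if start.isSome && (stripped == "") then
      goA rest (idx + 1) start (some idx)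
    else if start.isSome then
      (start, e)
    else
      goA rest (idx + 1) start e

def find_import_block (lines : List String) : Int × Int :=
  match goA lines 0 none none with
  | (none, _) => (-1, -1)
  | (some s, e) => ((s : Int), ((e.getD 0 : Nat) : Int))

-- ===== PORT B =====
-- tag of one line: 'i' import/from, 'b' blank, 'o' other
def tagOf (line : String) : Char :=
  let s := PySem.Str.strip line
  if PySem.Str.startswith s "import " || PySem.Str.startswith s "from " then 'i'
  else if s == "" then 'b' else 'o'

def find_import_block_alt (lines : List String) : Int × Int :=
  let tags : String := String.ofList (lines.map tagOf)   -- ''.join of the per-line tags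
  let start := PySem.Str.find tags "i"
  if start == -1 then (-1, -1)
  else
    let stop := PySem.Str.findFrom tags "o" start none
    let e := if stop != -1 then stop - 1 else (lines.length : Int) - 1
    (start, e)

-- ===== PRECONDITION & SPEC =====
def Spec_find_import_block (lines : List String) (out : Int × Int) : Prop := out = find_import_block_alt lines
instance (lines : List String) (out : Int × Int) : Decidable (Spec_find_import_block lines out) := by unfold Spec_find_import_block; infer_instance

-- ===== CLAIM =====
def Claim_equal_find_import_block : Prop := ∀ (lines : List String), Dom_find_import_block lines → Spec_find_import_block lines (find_import_block lines)

-- ===== LEMMAS AND PROOFS =====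

def isImportLine (line : String) : Bool :=
  let s := PySem.Str.strip line
  PySem.Str.startswith s "import " || PySem.Str.startswith s "from "

def isBadLine (line : String) : Bool := !(isImportLine line || PySem.Str.strip line == "")

lemma goA_cons (l : String) (rest : List String) (idx : Nat) (start e : Option Nat) :
    goA (l :: rest) idx start e =
      (if isImportLine l then goA rest (idx + 1) (some (start.getD idx)) (some idx)
       else if start.isSome && (PySem.Str.strip l == "") then goA rest (idx + 1) start (some idx)
       else if start.isSome then (start, e)
       else goA rest (idx + 1) start e) := by
  simp only [goA, isImportLine]
  rfl

-- once the block has started, A's loop runs to the first line that is neither import nor blank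
lemma phase2 (rest : List String) : ∀ (e s : Nat),
    goA rest (e + 1) (some s) (some e) =
      (some s, some (match List.findIdx? isBadLine rest with
        | some k => e + k
        | none => e + rest.length)) := by
  induction rest with
  | nil => intro e s; simp [goA, List.findIdx?_nil]
  | cons l rest ih =>
    intro e s
    rw [goA_cons]
    by_cases him : isImportLine l = true
    · rw [if_pos him]
      simp only [Option.getD_some]
      rw [ih (e + 1) s]
      have hb : isBadLine l = false := by simp [isBadLine, him]
      rw [List.findIdx?_cons, hb]
      simp only [Bool.false_eq_true, if_false]
      cases hf : List.findIdx? isBadLine rest with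
        | none =>
          simp only [Option.map_none, List.length_cons]
          have h2 : e + 1 + rest.length = e + (rest.length + 1) := by omega
          rw [h2]
        | some k =>
          simp only [Option.map_some]
          have h2 : e + 1 + k = e + (k + 1) := by omega
          rw [h2]
    · rw [if_neg him]
      by_cases hbl : (PySem.Str.strip l == "") = true
      · simp only [Option.isSome_some, Bool.true_and, hbl, if_true]
        rw [ih (e + 1) s]
        have hb : isBadLine l = false := by simp [isBadLine, hbl]
        rw [List.findIdx?_cons, hb]
        simp only [Bool.false_eq_true, if_false]
        cases hf : List.findIdx? isBadLine rest with
        | none =>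
          simp only [Option.map_none, List.length_cons]
          have h2 : e + 1 + rest.length = e + (rest.length + 1) := by omega
          rw [h2]
        | some k =>
          simp only [Option.map_some]
          have h2 : e + 1 + k = e + (k + 1) := by omega
          rw [h2]
      · simp only [Option.isSome_some, Bool.true_and, hbl, Bool.false_eq_true, if_false, if_true]
        have hb : isBadLine l = true := by
          simp only [isBadLine, Bool.not_eq_eq_eq_not, Bool.not_true, Bool.or_eq_false_iff]
          exact ⟨by simpa using him, by simpa using hbl⟩
        rw [List.findIdx?_cons, hb]
        simp

-- before the block starts A skips every non-import line; characterise the whole loop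
lemma phase1 (lines : List String) : ∀ (idx : Nat),
    goA lines idx none none =
      (match List.findIdx? isImportLine lines with
        | none => (none, none)
        | some s =>
          (some (idx + s), some (match List.findIdx? isBadLine (lines.drop (s + 1)) with
            | some k => idx + s + k
            | none => idx + lines.length - 1))) := by
  induction lines with
  | nil => intro idx; simp [goA, List.findIdx?_nil]
  | cons l rest ih =>
    intro idx
    rw [goA_cons]
    by_cases him : isImportLine l = true
    · rw [if_pos him, List.findIdx?_cons, if_pos him]
      simp only [Option.getD_none]
      rw [phase2 rest idx idx]
      simp only [List.drop_succ_cons, List.drop_zero, List.length_cons]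
      cases hf : List.findIdx? isBadLine rest with
        | none =>
          simp only [Nat.add_zero]
          have h2 : idx + (rest.length + 1) - 1 = idx + rest.length := by omega
          rw [h2]
        | some k =>
          simp only [Nat.add_zero]
    · rw [if_neg him]
      simp only [Option.isSome_none, Bool.false_and, Bool.false_eq_true, if_false]
      rw [ih (idx + 1), List.findIdx?_cons, if_neg him]
      cases hf : List.findIdx? isImportLine rest with
      | none => simp
      | some s' =>
        simp only [Option.map_some, List.drop_succ_cons, List.length_cons]
        have h1 : idx + 1 + s' = idx + (s' + 1) := by omega
        cases hg : List.findIdx? isBadLine (rest.drop (s' + 1)) with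
        | none =>
          have h2 : idx + 1 + rest.length - 1 = idx + (rest.length + 1) - 1 := by omega
          rw [h1, h2]
        | some k =>
          rw [h1]

-- [c] is a prefix of l iff l starts with c
lemma singleton_prefix_iff (c : Char) (l : List Char) : [c] <+: l ↔ l.head? = some c := by
  cases l with
  | nil => simp
  | cons a t =>
    constructor
    · rintro ⟨u, hu⟩; simp at hu; simp [hu.1]
    · intro h; simp at h; exact ⟨t, by simp [h]⟩

-- Python's s.find on a one-character needle is List.findIdx?
lemma find_singleton (cs : List Char) (c : Char) :
    PySem.Chars.find cs [c] =
      (match List.findIdx? (fun x => x == c) cs with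
       | none => -1 | some k => (k : Int)) := by
  by_cases hin : PySem.Chars.isIn [c] cs = true
  · have hpos : 0 ≤ PySem.Chars.find cs [c] :=
      (PySem.Chars.find_nonneg_iff cs [c]).mpr ((PySem.Chars.isIn_iff_infix [c] cs).mp hin)
    obtain ⟨hpre, hmin⟩ := PySem.Chars.find_spec (s := cs) (sub := [c]) hpos
    set n := (PySem.Chars.find cs [c]).toNat with hn
    have hget : cs[n]? = some c := by
      have := (singleton_prefix_iff c _).mp hpre
      rwa [List.head?_drop] at this
    have hlt : n < cs.length := by
      obtain ⟨h, _⟩ := List.getElem?_eq_some_iff.mp hget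
      exact h
    have hsome : List.findIdx? (fun x => x == c) cs = some n := by
      rw [List.findIdx?_eq_some_iff_getElem]
      refine ⟨hlt, by simp [List.getElem?_eq_some_iff] at hget; obtain ⟨h', hv⟩ := hget; simp [hv], ?_⟩
      intro j hj
      have hnp := hmin j hj
      rw [singleton_prefix_iff, List.head?_drop] at hnp
      simp only [List.getElem?_eq_getElem (by omega : j < cs.length)] at hnp
      simp only [beq_iff_eq]
      intro hc; exact hnp (by rw [hc])
    rw [hsome]
    exact (Int.toNat_of_nonneg hpos).symm
  · have hni : PySem.Chars.isIn [c] cs = false := by simpa using hin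
    have hfind : PySem.Chars.find cs [c] = -1 :=
      (PySem.Chars.find_eq_neg_one_iff cs [c]).mpr ((PySem.Chars.isIn_eq_false_iff [c] cs).mp hni)
    have hnone : List.findIdx? (fun x => x == c) cs = none := by
      rw [List.findIdx?_eq_none_iff]
      intro x hx
      by_contra hc
      simp only [Bool.not_eq_false, beq_iff_eq] at hc
      subst hc
      obtain ⟨i, hi⟩ := List.mem_iff_getElem?.mp hx
      have : [x] <+: cs.drop i := by rw [singleton_prefix_iff, List.head?_drop]; exact hi
      have := (PySem.Chars.exists_prefix_drop_iff_isIn [x] cs).mp ⟨i, this⟩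
      rw [hni] at this; exact Bool.noConfusion this
    rw [hnone, hfind]

lemma tagOf_i (l : String) : ((fun x => x == 'i') ∘ tagOf) l = isImportLine l := by
  simp only [Function.comp, tagOf, isImportLine]
  cases h : (PySem.Str.startswith (PySem.Str.strip l) "import " || PySem.Str.startswith (PySem.Str.strip l) "from ") with
  | true => simp
  | false => simp only [Bool.false_eq_true, if_false]; split_ifs <;> decide

lemma tagOf_o (l : String) : ((fun x => x == 'o') ∘ tagOf) l = isBadLine l := by
  simp only [Function.comp, tagOf, isBadLine, isImportLine]
  cases h : (PySem.Str.startswith (PySem.Str.strip l) "import " || PySem.Str.startswith (PySem.Str.strip l) "from ") with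
  | true => simp
  | false =>
    simp only [Bool.false_eq_true, if_false, Bool.false_or]
    by_cases h2 : (PySem.Str.strip l == "") = true <;> simp [h2]

lemma findIdx?_lt_length {p : String → Bool} {lines : List String} {s : Nat}
    (h : List.findIdx? p lines = some s) : s < lines.length := by
  have := List.findIdx?_eq_some_iff_getElem.mp h
  exact this.1

-- ===== VERDICT (by name: the statement is the Claim_ definition above) =====
theorem find_import_block_spec : Claim_equal_find_import_block := by
  intro lines _
  unfold Spec_find_import_block find_import_block
  simp only [find_import_block_alt]
  have htoI : ("i" : String).toList = ['i'] := by decide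
  have htoO : ("o" : String).toList = ['o'] := by decide
  have hfind : PySem.Str.find (String.ofList (lines.map tagOf)) "i"
      = PySem.Chars.find (lines.map tagOf) ['i'] := by
    rw [PySem.Str.find_eq, String.toList_ofList, htoI]
  have hA := phase1 lines 0
  cases hf : List.findIdx? isImportLine lines with
  | none =>
    rw [hf] at hA
    simp only [] at hA
    rw [hA]
    have hfi : List.findIdx? (fun x => x == 'i') (lines.map tagOf) = none := by
      rw [List.findIdx?_map, show ((fun x => x == 'i') ∘ tagOf) = isImportLine from funext tagOf_i, hf]
    simp only [hfind, find_singleton, hfi]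
    simp
  | some s =>
    rw [hf] at hA
    simp only [Nat.zero_add] at hA
    have hs : s < lines.length := findIdx?_lt_length hf
    have hfi : List.findIdx? (fun x => x == 'i') (lines.map tagOf) = some s := by
      rw [List.findIdx?_map, show ((fun x => x == 'i') ∘ tagOf) = isImportLine from funext tagOf_i, hf]
    have hsi : isImportLine lines[s] = true :=
      (List.findIdx?_eq_some_iff_getElem.mp hf).2.1
    have hstart : PySem.Str.find (String.ofList (lines.map tagOf)) "i" = (s : Int) := by
      rw [hfind, find_singleton, hfi]
    have hne : ((s : Int) == -1) = false := by simp
    have hffrom : PySem.Str.findFrom (String.ofList (lines.map tagOf)) "o" (s : Int) none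
        = PySem.Chars.findFrom (lines.map tagOf) ['o'] (s : Int) none := by
      rw [PySem.Str.findFrom_eq, String.toList_ofList, htoO]
    have hdropmap : (lines.map tagOf).drop s = tagOf lines[s] :: (lines.drop (s + 1)).map tagOf := by
      rw [List.drop_eq_getElem_cons (by simpa using hs), List.getElem_map, List.map_drop]
    have htagI : (tagOf lines[s] == 'o') = false := by
      have h1 := tagOf_o lines[s]
      have h2 : isBadLine lines[s] = false := by simp [isBadLine, hsi]
      simp only [Function.comp] at h1
      rw [h1, h2]
    cases hg : List.findIdx? isBadLine (lines.drop (s + 1)) with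
    | none =>
      rw [hg] at hA
      simp only [] at hA
      rw [hA]
      have hdf : PySem.Chars.find ((lines.map tagOf).drop s) ['o'] = -1 := by
        rw [hdropmap, find_singleton, List.findIdx?_cons, htagI]
        simp only [Bool.false_eq_true, if_false]
        rw [List.findIdx?_map, show ((fun x => x == 'o') ∘ tagOf) = isBadLine from funext tagOf_o, hg]
        simp
      have hstop : PySem.Str.findFrom (String.ofList (lines.map tagOf)) "o" ((s : Nat) : Int) none = -1 := by
        rw [hffrom, PySem.Chars.findFrom_natCast _ _ s (by simpa using hs.le), hdf]
        simp
      rw [hstart, hne]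
      simp only [Bool.false_eq_true, if_false]
      rw [hstop]
      simp only [Option.getD_some, show ((-1 : Int) != -1) = false from rfl,
        Bool.false_eq_true, if_false, Prod.mk.injEq]
      refine ⟨trivial, ?_⟩
      omega
    | some k =>
      rw [hg] at hA
      simp only [] at hA
      rw [hA]
      have hdf : PySem.Chars.find ((lines.map tagOf).drop s) ['o'] = ((k + 1 : Nat) : Int) := by
        rw [hdropmap, find_singleton, List.findIdx?_cons, htagI]
        simp only [Bool.false_eq_true, if_false]
        rw [List.findIdx?_map, show ((fun x => x == 'o') ∘ tagOf) = isBadLine from funext tagOf_o, hg]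
        simp
      have hstop : PySem.Str.findFrom (String.ofList (lines.map tagOf)) "o" ((s : Nat) : Int) none
          = (s : Int) + ((k + 1 : Nat) : Int) := by
        rw [hffrom, PySem.Chars.findFrom_natCast _ _ s (by simpa using hs.le), hdf]
        rw [if_neg (by push_cast; omega)]
      rw [hstart, hne]
      simp only [Bool.false_eq_true, if_false]
      rw [hstop]
      have hbne : (((s : Int) + ((k + 1 : Nat) : Int)) != -1) = true := by
        simp only [bne_iff_ne, ne_eq]; push_cast; omega
      rw [hbne]
      simp only [if_true, Option.getD_some, Prod.mk.injEq]
      refine ⟨trivial, ?_⟩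
      push_cast
      omega
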